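-- pv_equiv track=rewrite | github.com/Luc15l/prg-basics | 07-Arrays/mt2.10.py | f
-- ===== SOURCE A (Python) =====
-- def f(arr):
--     b=10
--     for wiersz in arr:
--         for liczba in wiersz:
--             if liczba<b:
--                 b=liczba
--     for i in range(len(arr)):
--         for j in range(len(arr[i])):
--             if arr[i][j]==b:
--                 r=i
--                 c=j
--     return c==r
-- ===== SOURCE B (Python) =====
-- def f(arr):
--     # single fused pass: track the running minimum (seeded 10, as in A) and the
--     # last position where it occurs; raises (on pos=None) exactly where A raises
--     cur_min = 10
--     pos = None
--     for i, row in enumerate(arr):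
--         for j, x in enumerate(row):
--             if x < cur_min:
--                 cur_min = x
--                 pos = (i, j)
--             elif x == cur_min:
--                 pos = (i, j)
--     return pos[0] == pos[1]
-- ===== Notes on version B (the rewrite author's own statement) =====
-- stated objective: alternative
-- what changed: B fuses A's two full scans (min pass, then position pass) into a single pass that maintains the running minimum together with the last position where it occurs.
import Mathlib
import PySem

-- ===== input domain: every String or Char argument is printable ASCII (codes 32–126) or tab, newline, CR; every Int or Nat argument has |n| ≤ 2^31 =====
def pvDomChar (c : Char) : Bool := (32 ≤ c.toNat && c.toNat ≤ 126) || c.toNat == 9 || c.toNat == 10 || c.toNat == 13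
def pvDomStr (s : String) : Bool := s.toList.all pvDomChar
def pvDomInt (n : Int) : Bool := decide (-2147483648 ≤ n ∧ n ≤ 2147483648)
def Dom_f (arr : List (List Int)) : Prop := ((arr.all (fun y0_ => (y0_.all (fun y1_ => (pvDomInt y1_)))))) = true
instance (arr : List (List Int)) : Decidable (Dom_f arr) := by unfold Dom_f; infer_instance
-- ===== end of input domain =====

-- B fuses A's two full scans (min pass, then last-position pass) into one pass keeping
-- (running min, last position of it); return values only — A raises UnboundLocalError
-- exactly where B raises TypeError (no element ≤ 10), excluded by Pre_f.

-- ===== PORT A =====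
def f (arr : List (List Int)) : Bool :=
  -- b = 10; for wiersz in arr: for liczba in wiersz: if liczba < b: b = liczba
  let b := arr.foldl (fun b wiersz =>
    wiersz.foldl (fun b liczba => if liczba < b then liczba else b) b) 10
  -- for i in range(len(arr)): for j in range(len(arr[i])): if arr[i][j]==b: r=i; c=j
  -- r, c start unbound (Python UnboundLocalError if never assigned): modelled as Options
  let rc := (PySem.List.pyRange 0 (PySem.List.len arr) 1).foldl (fun rc i =>
    (PySem.List.pyRange 0 (PySem.List.len (PySem.List.pyGetD arr i [])) 1).foldl (fun rc j =>
      if PySem.List.pyGetD (PySem.List.pyGetD arr i []) j 0 == b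
      then ((some i, some j) : Option Int × Option Int) else rc) rc)
    ((none, none) : Option Int × Option Int)
  -- return c == r  (both unbound → Python raises; `false` is a placeholder outside Pre_f)
  match rc with
  | (some r, some c) => c == r
  | _ => false

-- ===== PORT B =====
def f_alt (arr : List (List Int)) : Bool :=
  -- cur_min = 10; pos = None; single fused pass over enumerate(arr)/enumerate(row)
  let st := (PySem.List.enumerate arr 0).foldl (fun st p =>
    (PySem.List.enumerate p.2 0).foldl (fun st q =>
      if q.2 < st.1 then (q.2, some (p.1, q.1))
      else if q.2 == st.1 then (st.1, some (p.1, q.1))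
      else st) st) (((10 : Int), (none : Option (Int × Int))))
  -- return pos[0] == pos[1]  (pos None → Python raises; `false` placeholder outside Pre_f)
  match st.2 with
  | some (i, j) => i == j
  | none => false

-- ===== PRECONDITION & SPEC =====
-- Pre_f excludes exactly the inputs with no element ≤ 10 (including the empty array):
-- there A raises UnboundLocalError (r, c never assigned) and B raises TypeError (pos is None).
def Pre_f (arr : List (List Int)) : Prop := ∃ w ∈ arr, ∃ x ∈ w, x ≤ 10
instance (arr : List (List Int)) : Decidable (Pre_f arr) := by unfold Pre_f; infer_instance
def pvWitness_f : List (List Int) := [[3, 7], [2, 2]]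

def Spec_f (arr : List (List Int)) (out : Bool) : Prop := out = f_alt arr
instance (arr : List (List Int)) (out : Bool) : Decidable (Spec_f arr out) := by unfold Spec_f; infer_instance

-- ===== CLAIM (what is proved, stated in full; the proofs are below) =====
def Claim_equal_f : Prop := ∀ (arr : List (List Int)), Dom_f arr → Pre_f arr → Spec_f arr (f arr)

-- ===== LEMMAS AND PROOFS =====

-- the elements of arr decorated with their (row, column) indices, flattened
def pvDec (arr : List (List Int)) : List ((Int × Int) × Int) :=
  (PySem.List.enumerate arr 0).flatMap (fun p =>
    (PySem.List.enumerate p.2 0).map (fun q => ((p.1, q.1), q.2)))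

def pvMinf (l : List ((Int × Int) × Int)) (c : Int) : Int :=
  l.foldl (fun b e => if e.2 < b then e.2 else b) c

def pvAfold (l : List ((Int × Int) × Int)) (m : Int) (p : Option (Int × Int)) :
    Option (Int × Int) :=
  l.foldl (fun p e => if e.2 == m then some e.1 else p) p

def pvBfold (l : List ((Int × Int) × Int)) (st : Int × Option (Int × Int)) :
    Int × Option (Int × Int) :=
  l.foldl (fun st e =>
    if e.2 < st.1 then (e.2, some e.1)
    else if e.2 == st.1 then (st.1, some e.1)
    else st) st

theorem pv_minf_cons (e : (Int × Int) × Int) (t : List ((Int × Int) × Int)) (c : Int) :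
    pvMinf (e :: t) c = pvMinf t (if e.2 < c then e.2 else c) := rfl

theorem pv_afold_cons (e : (Int × Int) × Int) (t : List ((Int × Int) × Int)) (m : Int)
    (p : Option (Int × Int)) :
    pvAfold (e :: t) m p = pvAfold t m (if e.2 == m then some e.1 else p) := rfl

theorem pv_bfold_cons (e : (Int × Int) × Int) (t : List ((Int × Int) × Int))
    (c : Int) (p : Option (Int × Int)) :
    pvBfold (e :: t) (c, p)
      = pvBfold t (if e.2 < c then (e.2, some e.1)
                   else if e.2 == c then (c, some e.1) else (c, p)) := rfl

theorem pv_foldl_flatMap {α β σ : Type} (l : List α) (g : α → List β)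
    (h : σ → β → σ) (init : σ) :
    (l.flatMap g).foldl h init = l.foldl (fun a x => (g x).foldl h a) init := by
  induction l generalizing init with
  | nil => rfl
  | cons x t ih => simp [List.flatMap_cons, List.foldl_append, ih]

theorem pv_foldl_enumerate_snd {α σ : Type} (xs : List α) (s : Int)
    (g : σ → α → σ) (init : σ) :
    (PySem.List.enumerate xs s).foldl (fun a q => g a q.2) init = xs.foldl g init := by
  induction xs generalizing s init with
  | nil => rfl
  | cons x t ih => simp [PySem.List.enumerate_cons, ih]

-- a doubly-nested index-decorated loop is a single fold over the decorated flat list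
theorem pv_nested {σ : Type} (h : σ → ((Int × Int) × Int) → σ)
    (arr : List (List Int)) (init : σ) :
    (PySem.List.enumerate arr 0).foldl (fun st p =>
      (PySem.List.enumerate p.2 0).foldl (fun st q => h st ((p.1, q.1), q.2)) st) init
    = (pvDec arr).foldl h init := by
  rw [pvDec, pv_foldl_flatMap]
  apply PySem.List.foldl_congr_mem
  intro a p _
  rw [List.foldl_map]

theorem pv_minf_le (l : List ((Int × Int) × Int)) (c : Int) : pvMinf l c ≤ c := by
  induction l generalizing c with
  | nil => simp [pvMinf]
  | cons e t ih =>
    rw [pv_minf_cons]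
    by_cases h : e.2 < c
    · rw [if_pos h]; exact le_trans (ih e.2) (by omega)
    · rw [if_neg h]; exact ih c

theorem pv_minf_mem (l : List ((Int × Int) × Int)) (c : Int) :
    pvMinf l c = c ∨ ∃ e ∈ l, e.2 = pvMinf l c := by
  induction l generalizing c with
  | nil => left; rfl
  | cons e t ih =>
    rw [pv_minf_cons]
    rcases ih (if e.2 < c then e.2 else c) with h | ⟨e', he', hv⟩
    · by_cases he : e.2 < c
      · right; exact ⟨e, List.mem_cons_self, by rw [h, if_pos he]⟩
      · left; rw [h, if_neg he]
    · right; exact ⟨e', List.mem_cons_of_mem _ he', hv⟩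

theorem pv_afold_indep (l : List ((Int × Int) × Int)) (m : Int)
    (hm : ∃ e ∈ l, e.2 = m) (p₁ p₂ : Option (Int × Int)) :
    pvAfold l m p₁ = pvAfold l m p₂ := by
  induction l generalizing p₁ p₂ with
  | nil => rcases hm with ⟨e, he, _⟩; cases he
  | cons e t ih =>
    rcases hm with ⟨e', he', hv⟩
    rw [pv_afold_cons, pv_afold_cons]
    by_cases h : e.2 = m
    · rw [if_pos (by simp [h]), if_pos (by simp [h])]
    · rw [if_neg (by simp [h]), if_neg (by simp [h])]
      rcases List.mem_cons.mp he' with rfl | he't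
      · exact absurd hv h
      · exact ih ⟨e', he't, hv⟩ _ _

-- core invariant: the fused pass computes the min and the last position of the final min
theorem pv_core (l : List ((Int × Int) × Int)) (c : Int) (p : Option (Int × Int)) :
    pvBfold l (c, p) = (pvMinf l c, pvAfold l (pvMinf l c) p) := by
  induction l generalizing c p with
  | nil => rfl
  | cons e t ih =>
    rw [pv_bfold_cons, pv_minf_cons, pv_afold_cons]
    by_cases h1 : e.2 < c
    · rw [if_pos h1, if_pos h1, ih]
      congr 1
      by_cases h2 : e.2 = pvMinf t e.2
      · rw [if_pos (by simp [← h2])]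
      · rw [if_neg (by simp only [beq_iff_eq]; exact h2)]
        apply pv_afold_indep
        rcases pv_minf_mem t e.2 with h | h
        · exact absurd h.symm h2
        · exact h
    · rw [if_neg h1, if_neg h1]
      by_cases h2 : e.2 = c
      · rw [if_pos (by simp [h2]), ih]
        congr 1
        by_cases h3 : c = pvMinf t c
        · rw [h2, if_pos (by simp [← h3])]
        · rw [if_neg (by rw [h2]; simp only [beq_iff_eq]; exact h3)]
          apply pv_afold_indep
          rcases pv_minf_mem t c with h | h
          · exact absurd h.symm h3
          · exact h
      · rw [if_neg (by simp [h2]), ih]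
        congr 1
        have hne : ¬ (e.2 = pvMinf t c) := by
          have := pv_minf_le t c; omega
        rw [if_neg (by simp [hne])]

-- A's min loop is the min over the decorated flat list
theorem pv_minA_eq (arr : List (List Int)) :
    arr.foldl (fun b w => w.foldl (fun b x => if x < b then x else b) b) 10
      = pvMinf (pvDec arr) 10 := by
  calc arr.foldl (fun b w => w.foldl (fun b x => if x < b then x else b) b) 10
      = (PySem.List.enumerate arr 0).foldl
          (fun b p => p.2.foldl (fun b x => if x < b then x else b) b) 10 :=
        (pv_foldl_enumerate_snd arr 0
          (fun b w => w.foldl (fun b x => if x < b then x else b) b) 10).symm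
    _ = (PySem.List.enumerate arr 0).foldl (fun b p =>
          (PySem.List.enumerate p.2 0).foldl (fun b q => if q.2 < b then q.2 else b) b) 10 := by
        apply PySem.List.foldl_congr_mem
        intro a p _
        exact (pv_foldl_enumerate_snd p.2 0 (fun b x => if x < b then x else b) a).symm
    _ = pvMinf (pvDec arr) 10 :=
        pv_nested (fun b e => if e.2 < b then e.2 else b) arr 10

-- A's position loops equal pvAfold over the decorated flat list, up to the Option pairing
def pvConv (p : Option (Int × Int)) : Option Int × Option Int :=
  match p with
  | none => (none, none)
  | some (i, j) => (some i, some j)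

theorem pv_conv_afold (l : List ((Int × Int) × Int)) (b : Int) (p : Option (Int × Int)) :
    l.foldl (fun rc e =>
      if e.2 == b then ((some e.1.1, some e.1.2) : Option Int × Option Int) else rc) (pvConv p)
    = pvConv (pvAfold l b p) := by
  induction l generalizing p with
  | nil => rfl
  | cons e t ih =>
    rw [pv_afold_cons, List.foldl_cons]
    by_cases h : e.2 = b
    · rw [if_pos (by simp [h]), if_pos (by simp [h])]
      exact ih (some e.1)
    · rw [if_neg (by simp [h]), if_neg (by simp [h])]
      exact ih p

theorem pv_rcA_eq (arr : List (List Int)) (b : Int) :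
    (PySem.List.pyRange 0 (PySem.List.len arr) 1).foldl (fun rc i =>
      (PySem.List.pyRange 0 (PySem.List.len (PySem.List.pyGetD arr i [])) 1).foldl (fun rc j =>
        if PySem.List.pyGetD (PySem.List.pyGetD arr i []) j 0 == b
        then ((some i, some j) : Option Int × Option Int) else rc) rc)
      ((none, none) : Option Int × Option Int)
    = pvConv (pvAfold (pvDec arr) b none) := by
  calc (PySem.List.pyRange 0 (PySem.List.len arr) 1).foldl (fun rc i =>
        (PySem.List.pyRange 0 (PySem.List.len (PySem.List.pyGetD arr i [])) 1).foldl (fun rc j =>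
          if PySem.List.pyGetD (PySem.List.pyGetD arr i []) j 0 == b
          then ((some i, some j) : Option Int × Option Int) else rc) rc)
        ((none, none) : Option Int × Option Int)
      = (PySem.List.enumerate arr 0).foldl (fun rc p =>
          (PySem.List.enumerate p.2 0).foldl (fun rc q =>
            if q.2 == b then ((some p.1, some q.1) : Option Int × Option Int) else rc) rc)
          ((none, none) : Option Int × Option Int) := by
        rw [PySem.List.enumerate_eq_map_pyRange arr ([] : List Int), List.foldl_map]
        apply PySem.List.foldl_congr_mem
        intro rc i _
        rw [PySem.List.enumerate_eq_map_pyRange (PySem.List.pyGetD arr i []) (0 : Int),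
            List.foldl_map]
    _ = (pvDec arr).foldl (fun rc e =>
          if e.2 == b then ((some e.1.1, some e.1.2) : Option Int × Option Int) else rc)
          ((none, none) : Option Int × Option Int) :=
        pv_nested (fun rc e =>
          if e.2 == b then ((some e.1.1, some e.1.2) : Option Int × Option Int) else rc)
          arr ((none, none))
    _ = pvConv (pvAfold (pvDec arr) b none) := pv_conv_afold (pvDec arr) b none

theorem pv_main (arr : List (List Int)) : f arr = f_alt arr := by
  rw [f, f_alt]
  rw [pv_minA_eq, pv_rcA_eq,
      pv_nested (fun st e =>
        if e.2 < st.1 then (e.2, some e.1)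
        else if e.2 == st.1 then (st.1, some e.1) else st) arr ((10 : Int), none),
      show (∀ st, (pvDec arr).foldl (fun st e =>
        if e.2 < st.1 then (e.2, some e.1)
        else if e.2 == st.1 then (st.1, some e.1) else st) st = pvBfold (pvDec arr) st)
        from fun _ => rfl,
      pv_core]
  rcases pvAfold (pvDec arr) (pvMinf (pvDec arr) 10) none with _ | ⟨i, j⟩
  · rfl
  · show (j == i) = (i == j)
    by_cases h : i = j
    · simp [h]
    · have hji : ¬ j = i := fun hh => h hh.symm
      simp [h, hji]

-- ===== VERDICT (by name: the statement is the Claim_ definition above) =====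
theorem f_spec : Claim_equal_f := by
  intro arr _ _
  unfold Spec_f
  exact pv_main arr
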